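-- pv_equiv track=rewrite | github.com/ClaireLush/ConstraintChecker | xgConstraintChecker/utils.py | getInsertSql
-- ===== SOURCE A (Python) =====
-- def getInsertSql(insertType, newTable, tableName, noCols, geomCol = None, \
--                  inclDesc = False, inclDate = False, inclDist = False, inclGridRef = False):
--     insertSQL = 'Insert Into {0} ('.format(tableName)
--
--     if not newTable:
--         insertSQL += 'ref_number,'
--
--     if insertType == 'Record':
--         insertSQL += '{0},'.format(geomCol)
--
--     if insertType != 'Headings':
--         insertSQL += 'site,'
--         if inclGridRef:
--             insertSQL += 'sitegr,'
--         insertSQL += 'layer_name,'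
--
--     for i in range(1, noCols + 1):
--         insertSQL += 'colum{0},'.format(str(i))
--
--     if insertType != 'Summary':
--         if inclDesc:
--             insertSQL += 'desccol'
--         else:
--             insertSQL = insertSQL.rstrip(',')
--
--         if inclDate:
--             insertSQL += ',datecol'
--     else:
--         insertSQL = insertSQL.rstrip(',')
--
--     if insertType == 'Record':
--         if inclDist:
--             insertSQL += ',distance'
--
--     insertSQL += ') '
--
--     return insertSQL
-- ===== SOURCE B (Python) =====
-- def getInsertSql(insertType, newTable, tableName, noCols, geomCol=None,
--                  inclDesc=False, inclDate=False, inclDist=False, inclGridRef=False):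
--     cols = []
--     if not newTable:
--         cols.append('ref_number')
--     if insertType == 'Record':
--         cols.append('{0}'.format(geomCol))
--     if insertType != 'Headings':
--         cols.append('site')
--         if inclGridRef:
--             cols.append('sitegr')
--         cols.append('layer_name')
--     for i in range(1, noCols + 1):
--         cols.append('colum{0}'.format(i))
--     if insertType != 'Summary':
--         if inclDesc:
--             cols.append('desccol')
--         if inclDate:
--             cols.append('datecol')
--         if insertType == 'Record' and inclDist:
--             cols.append('distance')
--     return 'Insert Into {0} ('.format(tableName) + ','.join(cols) + ') '
-- ===== Notes on version B (the rewrite author's own statement) =====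
-- stated objective: simpler
-- what changed: B collects the column names in a list under the same conditions and emits the statement with a single ','.join, eliminating A's running-comma accumulation and the rstrip(',') repair passes.
-- intended difference: When insertType=='Headings', newTable is true, noCols<1, inclDesc is false and inclDate is true, no column precedes datecol, so A's unconditional ',datecol' yields the malformed 'Insert Into t (,datecol) ' while B returns the intended 'Insert Into t (datecol) '. — e.g. on getInsertSql("Headings", true, "t", 0, none, false, true, false, false): A returns "Insert Into t (,datecol) ", B returns "Insert Into t (datecol) "
import Mathlib
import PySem

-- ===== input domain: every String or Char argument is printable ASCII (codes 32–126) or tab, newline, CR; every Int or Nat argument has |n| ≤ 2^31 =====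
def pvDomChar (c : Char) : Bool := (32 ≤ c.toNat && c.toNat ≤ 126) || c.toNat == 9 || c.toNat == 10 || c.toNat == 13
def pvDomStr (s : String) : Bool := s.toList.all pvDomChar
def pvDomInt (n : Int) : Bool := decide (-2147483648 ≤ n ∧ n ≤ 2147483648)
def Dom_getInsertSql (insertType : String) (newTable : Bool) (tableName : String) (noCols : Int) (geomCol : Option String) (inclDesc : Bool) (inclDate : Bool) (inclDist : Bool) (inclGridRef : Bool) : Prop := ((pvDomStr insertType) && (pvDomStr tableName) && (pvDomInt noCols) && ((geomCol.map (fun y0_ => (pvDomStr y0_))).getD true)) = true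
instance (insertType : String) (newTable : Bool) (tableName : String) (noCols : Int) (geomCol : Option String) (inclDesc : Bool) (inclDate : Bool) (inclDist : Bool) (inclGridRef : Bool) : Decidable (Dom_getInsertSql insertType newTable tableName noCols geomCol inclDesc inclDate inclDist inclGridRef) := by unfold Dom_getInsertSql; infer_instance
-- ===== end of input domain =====

-- B collects the column names in a list and emits the statement with a single join,
-- replacing A's running-comma accumulation and rstrip(',') repair passes (objective: simpler).

-- ===== PORT A =====
-- '{0}'.format(x) for x an Optional[str]: None prints as "None"
def pyStrOpt (o : Option String) : String :=
  match o with
  | none => "None"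
  | some s => s

-- hand port of Python's s.rstrip(','): remove all trailing ',' characters (exact)
def rstripComma (s : String) : String :=
  String.ofList ((s.toList.reverse.dropWhile (· == ',')).reverse)

def getInsertSql (insertType : String) (newTable : Bool) (tableName : String) (noCols : Int) (geomCol : Option String) (inclDesc : Bool) (inclDate : Bool) (inclDist : Bool) (inclGridRef : Bool) : String :=
  let s := "Insert Into " ++ tableName ++ " ("
  let s := if !newTable then s ++ "ref_number," else s
  let s := if insertType == "Record" then s ++ (pyStrOpt geomCol ++ ",") else s
  let s := if insertType != "Headings" then
      let s := s ++ "site,"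
      let s := if inclGridRef then s ++ "sitegr," else s
      s ++ "layer_name,"
    else s
  let s := (PySem.List.pyRange 1 (noCols + 1)).foldl
      (fun s i => s ++ ("colum" ++ PySem.Int.toStr i ++ ",")) s
  let s := if insertType != "Summary" then
      let s := if inclDesc then s ++ "desccol" else rstripComma s
      if inclDate then s ++ ",datecol" else s
    else rstripComma s
  let s := if insertType == "Record" then (if inclDist then s ++ ",distance" else s) else s
  s ++ ") "

-- ===== PORT B =====
def getInsertSql_alt (insertType : String) (newTable : Bool) (tableName : String) (noCols : Int) (geomCol : Option String) (inclDesc : Bool) (inclDate : Bool) (inclDist : Bool) (inclGridRef : Bool) : String :=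
  let cols : List String := []
  let cols := if !newTable then cols ++ ["ref_number"] else cols
  let cols := if insertType == "Record" then cols ++ [pyStrOpt geomCol] else cols
  let cols := if insertType != "Headings" then
      let cols := cols ++ ["site"]
      let cols := if inclGridRef then cols ++ ["sitegr"] else cols
      cols ++ ["layer_name"]
    else cols
  let cols := cols ++ (PySem.List.pyRange 1 (noCols + 1)).map (fun i => "colum" ++ PySem.Int.toStr i)
  let cols := if insertType != "Summary" then
      let cols := if inclDesc then cols ++ ["desccol"] else cols
      let cols := if inclDate then cols ++ ["datecol"] else cols
      if insertType == "Record" && inclDist then cols ++ ["distance"] else cols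
    else cols
  ("Insert Into " ++ tableName ++ " (") ++ PySem.Str.join "," cols ++ ") "

-- ===== PRECONDITION & SPEC =====
-- When insertType=='Headings', newTable is true, noCols<1, inclDesc is false and inclDate is true,
-- no column name precedes datecol, so A's unconditional ',datecol' produces the malformed
-- 'Insert Into t (,datecol) ' while B returns the intended 'Insert Into t (datecol) '.
def D_getInsertSql (insertType : String) (newTable : Bool) (tableName : String) (noCols : Int) (geomCol : Option String) (inclDesc : Bool) (inclDate : Bool) (inclDist : Bool) (inclGridRef : Bool) : Prop :=
  insertType = "Headings" ∧ newTable = true ∧ noCols < 1 ∧ inclDesc = false ∧ inclDate = true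
instance (insertType : String) (newTable : Bool) (tableName : String) (noCols : Int) (geomCol : Option String) (inclDesc : Bool) (inclDate : Bool) (inclDist : Bool) (inclGridRef : Bool) : Decidable (D_getInsertSql insertType newTable tableName noCols geomCol inclDesc inclDate inclDist inclGridRef) := by unfold D_getInsertSql; infer_instance

def Spec_getInsertSql (insertType : String) (newTable : Bool) (tableName : String) (noCols : Int) (geomCol : Option String) (inclDesc : Bool) (inclDate : Bool) (inclDist : Bool) (inclGridRef : Bool) (out : String) : Prop := ¬ D_getInsertSql insertType newTable tableName noCols geomCol inclDesc inclDate inclDist inclGridRef → out = getInsertSql_alt insertType newTable tableName noCols geomCol inclDesc inclDate inclDist inclGridRef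
instance (insertType : String) (newTable : Bool) (tableName : String) (noCols : Int) (geomCol : Option String) (inclDesc : Bool) (inclDate : Bool) (inclDist : Bool) (inclGridRef : Bool) (out : String) : Decidable (Spec_getInsertSql insertType newTable tableName noCols geomCol inclDesc inclDate inclDist inclGridRef out) := by unfold Spec_getInsertSql; infer_instance

def pvDiffWitness_getInsertSql : String × Bool × String × Int × Option String × Bool × Bool × Bool × Bool :=
  ("Headings", true, "t", 0, none, false, true, false, false)
def pvDiffWitnessOut_getInsertSql : String × String :=
  ("Insert Into t (,datecol) ", "Insert Into t (datecol) ")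

-- ===== CLAIM (what is proved, stated in full; the proofs are below) =====
def Claim_unchanged_getInsertSql : Prop := ∀ (insertType : String) (newTable : Bool) (tableName : String) (noCols : Int) (geomCol : Option String) (inclDesc : Bool) (inclDate : Bool) (inclDist : Bool) (inclGridRef : Bool), Dom_getInsertSql insertType newTable tableName noCols geomCol inclDesc inclDate inclDist inclGridRef → Spec_getInsertSql insertType newTable tableName noCols geomCol inclDesc inclDate inclDist inclGridRef (getInsertSql insertType newTable tableName noCols geomCol inclDesc inclDate inclDist inclGridRef)
def Claim_changed_getInsertSql : Prop := Dom_getInsertSql (pvDiffWitness_getInsertSql.1) (pvDiffWitness_getInsertSql.2.1) (pvDiffWitness_getInsertSql.2.2.1) (pvDiffWitness_getInsertSql.2.2.2.1) (pvDiffWitness_getInsertSql.2.2.2.2.1) (pvDiffWitness_getInsertSql.2.2.2.2.2.1) (pvDiffWitness_getInsertSql.2.2.2.2.2.2.1) (pvDiffWitness_getInsertSql.2.2.2.2.2.2.2.1) (pvDiffWitness_getInsertSql.2.2.2.2.2.2.2.2) ∧ D_getInsertSql (pvDiffWitness_getInsertSql.1) (pvDiffWitness_getInsertSql.2.1) (pvDiffWitness_getInsertSql.2.2.1)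 (pvDiffWitness_getInsertSql.2.2.2.1) (pvDiffWitness_getInsertSql.2.2.2.2.1) (pvDiffWitness_getInsertSql.2.2.2.2.2.1) (pvDiffWitness_getInsertSql.2.2.2.2.2.2.1) (pvDiffWitness_getInsertSql.2.2.2.2.2.2.2.1) (pvDiffWitness_getInsertSql.2.2.2.2.2.2.2.2) ∧ getInsertSql (pvDiffWitness_getInsertSql.1) (pvDiffWitness_getInsertSql.2.1) (pvDiffWitness_getInsertSql.2.2.1) (pvDiffWitness_getInsertSql.2.2.2.1) (pvDiffWitness_getInsertSql.2.2.2.2.1) (pvDiffWitness_getInsertSql.2.2.2.2.2.1) (pvDiffWitness_getInsertSql.2.2.2.2.2.2.1) (pvDiffWitness_getInsertSql.2.2.2.2.2.2.2.1) (pvDiffWitness_getInsertSql.2.2.2.2.2.2.2.2) = pvDiffWitnessOut_getInsertSql.1 ∧ getInsertSql_alt (pvDiffWitness_getInsertSql.1) (pvDiffWitness_getInsertSql.2.1) (pvDiffWitness_getInsertSql.2.2.1) (pvDiffWitness_getInsertSql.2.2.2.1) (pvDiffWitness_getInsertSql.2.2.2.2.1) (pvDiffWitness_getInsertSql.2.2.2.2.2.1)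 (pvDiffWitness_getInsertSql.2.2.2.2.2.2.1) (pvDiffWitness_getInsertSql.2.2.2.2.2.2.2.1) (pvDiffWitness_getInsertSql.2.2.2.2.2.2.2.2) = pvDiffWitnessOut_getInsertSql.2 ∧ pvDiffWitnessOut_getInsertSql.1 ≠ pvDiffWitnessOut_getInsertSql.2
def Claim_exact_getInsertSql : Prop := ∀ (insertType : String) (newTable : Bool) (tableName : String) (noCols : Int) (geomCol : Option String) (inclDesc : Bool) (inclDate : Bool) (inclDist : Bool) (inclGridRef : Bool), Dom_getInsertSql insertType newTable tableName noCols geomCol inclDesc inclDate inclDist inclGridRef → D_getInsertSql insertType newTable tableName noCols geomCol inclDesc inclDate inclDist inclGridRef → getInsertSql insertType newTable tableName noCols geomCol inclDesc inclDate inclDist inclGridRef ≠ getInsertSql_alt insertType newTable tableName noCols geomCol inclDesc inclDate inclDist inclGridRef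

-- ===== LEMMAS AND PROOFS =====

-- the comma-terminated concatenation A's '+= "name,"' steps build
def catC : List String → String
  | [] => ""
  | c :: cs => (c ++ ",") ++ catC cs

-- the column list both programs have assembled just before the Summary/desc/date logic
def colsPre (insertType : String) (newTable : Bool) (noCols : Int) (geomCol : Option String) (inclGridRef : Bool) : List String :=
  (if !newTable then ["ref_number"] else []) ++
  (if insertType == "Record" then [pyStrOpt geomCol] else []) ++
  (if insertType != "Headings" then "site" :: ((if inclGridRef then ["sitegr"] else []) ++ ["layer_name"]) else []) ++
  (PySem.List.pyRange 1 (noCols + 1)).map (fun i => "colum" ++ PySem.Int.toStr i)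

-- every element of cols.getLast? is nonempty and does not end in ','
def lastOk (P : List String) : Prop :=
  ∀ d ∈ P.getLast?, d.toList ≠ [] ∧ d.toList.getLast? ≠ some ','

lemma catC_append (a b : List String) : catC (a ++ b) = catC a ++ catC b := by
  induction a with
  | nil => simp [catC]
  | cons c cs ih => simp [catC, ih, String.append_assoc]

lemma foldl_colum (l : List Int) (s : String) :
    l.foldl (fun s i => s ++ ("colum" ++ PySem.Int.toStr i ++ ",")) s
      = s ++ catC (l.map fun i => "colum" ++ PySem.Int.toStr i) := by
  induction l generalizing s with
  | nil => simp [catC]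
  | cons i t ih => rw [List.foldl_cons, ih]; simp [catC, String.append_assoc]


-- literal splits used to line the two shapes up (proved by evaluation)
lemma lit_ref : ("ref_number," : String) = "ref_number" ++ "," := by decide
lemma lit_site : ("site," : String) = "site" ++ "," := by decide
lemma lit_sitegr : ("sitegr," : String) = "sitegr" ++ "," := by decide
lemma lit_layer : ("layer_name," : String) = "layer_name" ++ "," := by decide
lemma lit_date : (",datecol" : String) = "," ++ "datecol" := by decide
lemma lit_dist : (",distance" : String) = "," ++ "distance" := by decide

lemma strJoin_nil : PySem.Str.join "," ([] : List String) = "" := by decide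

lemma strJoin_singleton (a : String) : PySem.Str.join "," [a] = a := by
  apply String.toList_inj.mp
  simp [PySem.Str.toList_join, PySem.Chars.join_singleton]

lemma strJoin_cons_cons (a b : String) (l : List String) :
    PySem.Str.join "," (a :: b :: l) = a ++ ("," ++ PySem.Str.join "," (b :: l)) := by
  apply String.toList_inj.mp
  simp [PySem.Str.toList_join, PySem.Chars.join_cons_cons, String.toList_append]

lemma join_snoc (Q : List String) (d : String) :
    PySem.Str.join "," (Q ++ [d]) = catC Q ++ d := by
  induction Q with
  | nil => simp [catC, strJoin_singleton]
  | cons c cs ih =>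
    cases h : cs ++ [d] with
    | nil => simp at h
    | cons b t =>
      rw [List.cons_append, h, strJoin_cons_cons, ← h, ih]
      simp [catC, String.append_assoc]

lemma catC_of_ne_nil (Q : List String) (h : Q ≠ []) :
    catC Q = PySem.Str.join "," Q ++ "," := by
  induction Q with
  | nil => exact absurd rfl h
  | cons c cs ih =>
    cases cs with
    | nil => simp [catC, strJoin_singleton]
    | cons b t =>
      rw [show catC (c :: b :: t) = (c ++ ",") ++ catC (b :: t) from rfl, ih (by simp),
        strJoin_cons_cons]
      simp [String.append_assoc]

lemma join_snoc_ne (Q : List String) (d : String) (h : Q ≠ []) :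
    PySem.Str.join "," (Q ++ [d]) = PySem.Str.join "," Q ++ ("," ++ d) := by
  rw [join_snoc, catC_of_ne_nil Q h, String.append_assoc]

lemma digitChar_ne_comma (m : Nat) : Nat.digitChar m ≠ ',' := by
  rcases Nat.lt_or_ge m 16 with h | h
  · interval_cases m <;> decide
  · simp only [Nat.digitChar, show m ≠ 0 by omega, show m ≠ 1 by omega, show m ≠ 2 by omega,
      show m ≠ 3 by omega, show m ≠ 4 by omega, show m ≠ 5 by omega, show m ≠ 6 by omega,
      show m ≠ 7 by omega, show m ≠ 8 by omega, show m ≠ 9 by omega, show m ≠ 10 by omega,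
      show m ≠ 11 by omega, show m ≠ 12 by omega, show m ≠ 13 by omega, show m ≠ 14 by omega,
      show m ≠ 15 by omega, if_false]
    decide

lemma toDigitsCore_ne_nil (b f n : Nat) (l : List Char) (h : l ≠ []) :
    Nat.toDigitsCore b f n l ≠ [] := by
  induction f generalizing n l with
  | zero => simpa [Nat.toDigitsCore]
  | succ f ih =>
    simp only [Nat.toDigitsCore]
    split
    · simp
    · exact ih _ _ (by simp)

lemma toDigitsCore_no_comma (b f n : Nat) (l : List Char) (h : ∀ c ∈ l, c ≠ ',') :
    ∀ c ∈ Nat.toDigitsCore b f n l, c ≠ ',' := by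
  induction f generalizing n l with
  | zero => simpa [Nat.toDigitsCore]
  | succ f ih =>
    simp only [Nat.toDigitsCore]
    split
    · intro c hc
      rcases List.mem_cons.mp hc with rfl | hc
      · exact digitChar_ne_comma _
      · exact h _ hc
    · refine ih _ _ ?_
      intro c hc
      rcases List.mem_cons.mp hc with rfl | hc
      · exact digitChar_ne_comma _
      · exact h _ hc

lemma toDigits_ne_nil (b n : Nat) : Nat.toDigits b n ≠ [] := by
  unfold Nat.toDigits
  simp only [Nat.toDigitsCore]
  split
  · simp
  · exact toDigitsCore_ne_nil _ _ _ _ (by simp)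

lemma toDigits_no_comma (b n : Nat) : ∀ c ∈ Nat.toDigits b n, c ≠ ',' :=
  toDigitsCore_no_comma _ _ _ _ (by simp)

lemma toChars_ne_nil (i : Int) : PySem.Int.toChars i ≠ [] := by
  unfold PySem.Int.toChars
  split
  · simp
  · exact toDigits_ne_nil _ _

lemma toChars_no_comma (i : Int) : ∀ c ∈ PySem.Int.toChars i, c ≠ ',' := by
  unfold PySem.Int.toChars
  split
  · intro c hc
    rcases List.mem_cons.mp hc with rfl | hc
    · decide
    · exact toDigits_no_comma _ _ _ hc
  · exact toDigits_no_comma _ _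

lemma toChars_last_ne (i : Int) : (PySem.Int.toChars i).getLast? ≠ some ',' := by
  intro h
  exact toChars_no_comma i _ (List.mem_of_getLast? h) rfl

lemma rstrip_last_ne (s : String) (h : s.toList.getLast? ≠ some ',') : rstripComma s = s := by
  apply String.toList_inj.mp
  rw [rstripComma, String.toList_ofList]
  cases hr : s.toList.reverse with
  | nil =>
    have h0 : s.toList = [] := by simpa using congrArg List.reverse hr
    rw [h0]
    simp
  | cons c t =>
    have hc : s.toList.getLast? = some c := by
      rw [← List.head?_reverse, hr]; rfl
    have hb : (c == ',') = false := by
      by_cases hceq : c = ','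
      · rw [hceq] at hc; exact absurd hc h
      · simpa using hceq
    rw [List.dropWhile_cons, hb]
    simp only [Bool.false_eq_true, if_false]
    rw [← hr, List.reverse_reverse]

lemma rstrip_comma_end (x : String) : rstripComma (x ++ ",") = rstripComma x := by
  apply String.toList_inj.mp
  simp only [rstripComma, String.toList_ofList, String.toList_append]
  rw [show ("," : String).toList = [','] from rfl, List.reverse_append]
  simp [List.dropWhile_cons]

lemma rstrip_cat (base : String) (P : List String)
    (hb : base.toList.getLast? = some '(') (hP : lastOk P) :
    rstripComma (base ++ catC P) = base ++ PySem.Str.join "," P := by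
  rcases List.eq_nil_or_concat P with rfl | ⟨Q, d, rfl⟩
  · rw [show catC [] = "" from rfl, String.append_empty, strJoin_nil, String.append_empty]
    exact rstrip_last_ne base (by rw [hb]; decide)
  · rw [List.concat_eq_append] at *
    obtain ⟨hdne, hdlast⟩ := hP d (by rw [Option.mem_def, List.getLast?_concat])
    rw [catC_append, show catC [d] = (d ++ ",") ++ "" from rfl, String.append_empty,
      ← String.append_assoc, ← String.append_assoc, rstrip_comma_end]
    rw [rstrip_last_ne _ ?_, join_snoc, String.append_assoc]
    rw [String.toList_append, List.getLast?_append]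
    obtain ⟨e, he⟩ := Option.isSome_iff_exists.mp (List.getLast?_isSome.mpr hdne)
    rw [he, Option.some_or]
    rw [he] at hdlast
    exact hdlast

lemma base_last (t : String) : ("Insert Into " ++ t ++ " (").toList.getLast? = some '(' := by
  rw [String.toList_append, List.getLast?_append,
    show (" (" : String).toList.getLast? = some '(' by decide, Option.some_or]

lemma pyRange_one_nil_iff (b : Int) : PySem.List.pyRange 1 b = [] ↔ b ≤ 1 := by
  simp [PySem.List.pyRange, List.range_eq_nil]
  constructor
  · intro h
    by_contra hb
    push Not at hb
    simp [show (1:Int) < b from by omega] at h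
    omega
  · intro h
    simp [show ¬ (1:Int) < b from by omega]

lemma colsPre_eq_nil_iff (it : String) (nt : Bool) (nc : Int) (gc : Option String) (gr : Bool) :
    colsPre it nt nc gc gr = [] ↔ (it = "Headings" ∧ nt = true ∧ nc < 1) := by
  simp only [colsPre, List.append_eq_nil_iff, List.map_eq_nil_iff]
  constructor
  · rintro ⟨⟨⟨h1, _h2⟩, h3⟩, h4⟩
    have hit : it = "Headings" := by
      by_contra hne
      simp [hne] at h3
    have hnt : nt = true := by
      by_contra hnt
      simp [Bool.not_eq_true] at hnt
      simp [hnt] at h1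
    have hnc : nc < 1 := by
      have := (pyRange_one_nil_iff (nc + 1)).mp h4
      omega
    exact ⟨hit, hnt, hnc⟩
  · rintro ⟨rfl, rfl, hnc⟩
    refine ⟨⟨⟨by simp, by simp⟩, by simp⟩, ?_⟩
    rw [pyRange_one_nil_iff]
    omega

lemma colum_ok (i : Int) :
    ("colum" ++ PySem.Int.toStr i).toList ≠ [] ∧
      ("colum" ++ PySem.Int.toStr i).toList.getLast? ≠ some ',' := by
  rw [String.toList_append, PySem.Int.toList_toStr]
  constructor
  · simp
  · rw [List.getLast?_append]
    obtain ⟨e, he⟩ := Option.isSome_iff_exists.mp (List.getLast?_isSome.mpr (toChars_ne_nil i))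
    rw [he, Option.some_or, ← he]
    exact toChars_last_ne i

lemma lastOk_colsPre (it : String) (nt : Bool) (nc : Int) (gc : Option String) (gr : Bool) :
    lastOk (colsPre it nt nc gc gr) := by
  intro d hd
  rw [Option.mem_def] at hd
  unfold colsPre at hd
  rcases List.eq_nil_or_concat ((PySem.List.pyRange 1 (nc + 1)).map
      (fun i => "colum" ++ PySem.Int.toStr i)) with hM | ⟨M', m, hM⟩
  · rw [hM, List.append_nil] at hd
    by_cases hH : (it != "Headings") = true
    · have hC : ("site" :: ((if gr then ["sitegr"] else []) ++ ["layer_name"])).getLast?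
          = some "layer_name" := by
        cases gr <;> decide
      rw [if_pos hH, List.getLast?_append, List.getLast?_append, hC, Option.some_or] at hd
      obtain rfl := Option.some.inj hd
      decide
    · have hH' : it = "Headings" := by simpa using hH
      subst hH'
      rw [if_neg hH, List.append_nil,
        show (("Headings" : String) == "Record") = false from by decide] at hd
      simp only [Bool.false_eq_true, if_false, List.append_nil] at hd
      cases nt with
      | true => simp at hd
      | false =>
        simp at hd
        subst hd
        decide
  · rw [hM, List.concat_eq_append, ← List.append_assoc, List.getLast?_concat] at hd
    obtain rfl := Option.some.inj hd
    have hm : m ∈ M' ++ [m] := by simp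
    rw [← List.concat_eq_append, ← hM] at hm
    obtain ⟨i, _, rfl⟩ := List.mem_map.mp hm
    exact colum_ok i

lemma stage4_eq (it : String) (nt : Bool) (tn : String) (nc : Int) (gc : Option String)
    (gr : Bool) :
    List.foldl (fun s i => s ++ ("colum" ++ PySem.Int.toStr i ++ ","))
      (let s := "Insert Into " ++ tn ++ " (";
       let s := if !nt then s ++ "ref_number," else s;
       let s := if it == "Record" then s ++ (pyStrOpt gc ++ ",") else s;
       if it != "Headings" then
         (let s := s ++ "site,";
          let s := if gr then s ++ "sitegr," else s;
          s ++ "layer_name,")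
       else s)
      (PySem.List.pyRange 1 (nc + 1))
      = ("Insert Into " ++ tn ++ " (") ++ catC (colsPre it nt nc gc gr) := by
  simp only []
  rw [foldl_colum]
  unfold colsPre
  by_cases h1 : (!nt) = true <;> by_cases h2 : (it == "Record") = true <;>
    by_cases h3 : (it != "Headings") = true <;> cases gr <;>
      simp [h1, h2, h3, catC_append, catC, lit_ref, lit_site, lit_sitegr, lit_layer,
        ← String.append_assoc, String.append_empty, String.empty_append, -String.reduceAppend]

lemma cols4_eq (it : String) (nt : Bool) (nc : Int) (gc : Option String) (gr : Bool) :
    (let cols : List String := [];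
     let cols := if !nt then cols ++ ["ref_number"] else cols;
     let cols := if it == "Record" then cols ++ [pyStrOpt gc] else cols;
     let cols := if it != "Headings" then
         (let cols := cols ++ ["site"];
          let cols := if gr then cols ++ ["sitegr"] else cols;
          cols ++ ["layer_name"])
       else cols;
     cols ++ (PySem.List.pyRange 1 (nc + 1)).map (fun i => "colum" ++ PySem.Int.toStr i))
      = colsPre it nt nc gc gr := by
  simp only []
  unfold colsPre
  by_cases h1 : (!nt) = true <;> by_cases h2 : (it == "Record") = true <;>
    by_cases h3 : (it != "Headings") = true <;> cases gr <;>
      simp [h1, h2, h3]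

lemma A_eq (it : String) (nt : Bool) (tn : String) (nc : Int) (gc : Option String)
    (dsc dt dst gr : Bool) :
    getInsertSql it nt tn nc gc dsc dt dst gr =
      (let base := "Insert Into " ++ tn ++ " (";
       let P := colsPre it nt nc gc gr;
       let s := if it != "Summary" then
           (let s := if dsc then (base ++ catC P) ++ "desccol" else rstripComma (base ++ catC P);
            if dt then s ++ ",datecol" else s)
         else rstripComma (base ++ catC P);
       (if it == "Record" then (if dst then s ++ ",distance" else s) else s) ++ ") ") := by
  unfold getInsertSql
  simp only []
  rw [stage4_eq]

lemma B_eq (it : String) (nt : Bool) (tn : String) (nc : Int) (gc : Option String)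
    (dsc dt dst gr : Bool) :
    getInsertSql_alt it nt tn nc gc dsc dt dst gr =
      (let base := "Insert Into " ++ tn ++ " (";
       let P := colsPre it nt nc gc gr;
       let Q := if it != "Summary" then
           (let Q := if dsc then P ++ ["desccol"] else P;
            let Q := if dt then Q ++ ["datecol"] else Q;
            if it == "Record" && dst then Q ++ ["distance"] else Q)
         else P;
       base ++ PySem.Str.join "," Q ++ ") ") := by
  unfold getInsertSql_alt
  simp only []
  rw [cols4_eq]

lemma dist_stage (it : String) (dst : Bool) (base : String) (Q : List String)
    (hQ : (it == "Record") = true → Q ≠ []) :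
    (if it == "Record" then
       (if dst then (base ++ PySem.Str.join "," Q) ++ ",distance"
        else base ++ PySem.Str.join "," Q)
     else base ++ PySem.Str.join "," Q) ++ ") "
    = base ++ PySem.Str.join "," (if it == "Record" && dst then Q ++ ["distance"] else Q)
        ++ ") " := by
  by_cases hR : (it == "Record") = true
  · cases dst with
    | false => simp [hR]
    | true =>
      simp only [hR, Bool.true_and, reduceIte]
      rw [lit_dist, join_snoc_ne _ _ (hQ hR)]
      simp [String.append_assoc]
  · have hR' : (it == "Record") = false := by simpa using hR
    simp [hR']

lemma record_ne_nil (it : String) (nt : Bool) (nc : Int) (gc : Option String) (gr : Bool)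
    (hR : (it == "Record") = true) : colsPre it nt nc gc gr ≠ [] := by
  intro h0
  rw [colsPre_eq_nil_iff] at h0
  rw [h0.1] at hR
  exact absurd hR (by decide)

-- ===== VERDICT (by name: the statement is the Claim_ definition above) =====
theorem getInsertSql_spec : Claim_unchanged_getInsertSql := by
  intro it nt tn nc gc dsc dt dst gr _hDom hD
  rw [A_eq, B_eq]
  simp only []
  have hbl := base_last tn
  have hlast := lastOk_colsPre it nt nc gc gr
  by_cases hS : it = "Summary"
  · subst hS
    simp only [show (("Summary" : String) != "Summary") = false from by decide,
      show (("Summary" : String) == "Record") = false from by decide,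
      Bool.false_eq_true, if_false]
    rw [rstrip_cat _ _ hbl hlast]
  · have hS' : (it != "Summary") = true := by simpa using hS
    simp only [hS', reduceIte]
    cases dsc with
    | false =>
      simp only [Bool.false_eq_true, if_false]
      cases dt with
      | false =>
        simp only [Bool.false_eq_true, if_false]
        rw [rstrip_cat _ _ hbl hlast]
        exact dist_stage it dst _ _ (record_ne_nil it nt nc gc gr)
      | true =>
        have hPne : colsPre it nt nc gc gr ≠ [] := by
          intro h0
          rw [colsPre_eq_nil_iff] at h0
          exact hD ⟨h0.1, h0.2.1, h0.2.2, rfl, rfl⟩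
        simp only [reduceIte]
        rw [rstrip_cat _ _ hbl hlast]
        have hstep : ("Insert Into " ++ tn ++ " (" ++
              PySem.Str.join "," (colsPre it nt nc gc gr)) ++ ",datecol"
            = "Insert Into " ++ tn ++ " (" ++
              PySem.Str.join "," (colsPre it nt nc gc gr ++ ["datecol"]) := by
          rw [lit_date, String.append_assoc, ← join_snoc_ne _ _ hPne]
        rw [hstep]
        exact dist_stage it dst _ _ (fun _ => by simp)
    | true =>
      simp only [reduceIte]
      have hstep : ("Insert Into " ++ tn ++ " (" ++
            catC (colsPre it nt nc gc gr)) ++ "desccol"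
          = "Insert Into " ++ tn ++ " (" ++
            PySem.Str.join "," (colsPre it nt nc gc gr ++ ["desccol"]) := by
        rw [String.append_assoc, ← join_snoc]
      rw [hstep]
      cases dt with
      | false =>
        simp only [Bool.false_eq_true, if_false]
        exact dist_stage it dst _ _ (fun _ => by simp)
      | true =>
        simp only [reduceIte]
        have hstep2 : ("Insert Into " ++ tn ++ " (" ++
              PySem.Str.join "," (colsPre it nt nc gc gr ++ ["desccol"])) ++ ",datecol"
            = "Insert Into " ++ tn ++ " (" ++
              PySem.Str.join "," ((colsPre it nt nc gc gr ++ ["desccol"]) ++ ["datecol"]) := by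
          rw [lit_date, String.append_assoc, ← join_snoc_ne _ _ (by simp)]
        rw [hstep2]
        exact dist_stage it dst _ _ (fun _ => by simp)

theorem getInsertSql_changed : Claim_changed_getInsertSql := by
  unfold Claim_changed_getInsertSql; decide

theorem getInsertSql_tight : Claim_exact_getInsertSql := by
  intro it nt tn nc gc dsc dt dst gr _hDom hd
  obtain ⟨rfl, rfl, hnc, rfl, rfl⟩ := hd
  rw [A_eq, B_eq]
  simp only []
  have hP : colsPre "Headings" true nc gc gr = [] := by
    rw [colsPre_eq_nil_iff]; exact ⟨rfl, rfl, hnc⟩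
  rw [hP]
  simp only [show (("Headings" : String) != "Summary") = true from by decide,
    show (("Headings" : String) == "Record") = false from by decide,
    Bool.false_eq_true, Bool.false_and, if_false, reduceIte]
  rw [show catC [] = "" from rfl, String.append_empty,
    rstrip_last_ne _ (by rw [base_last tn]; decide),
    show ([] : List String) ++ ["datecol"] = ["datecol"] from rfl, strJoin_singleton]
  intro heq
  have := congrArg String.toList heq
  simp only [String.toList_append] at this
  simp only [List.append_assoc] at this
  have h2 := List.append_cancel_left (List.append_cancel_left (List.append_cancel_left this))
  exact absurd h2 (by decide)
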